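-- pv_equiv track=rewrite | github.com/Nghia03092004/nghia03092004.github.io | project_euler_unified/problem_464/solution.py | C_brute
-- ===== SOURCE A (Python) =====
-- def mobius_sieve(n: int) -> list:
--     """Compute mu(k) for k = 0..n."""
--     mu = [0] * (n + 1)
--     mu[1] = 1
--     is_prime = [True] * (n + 1)
--     primes = []
--     for i in range(2, n + 1):
--         if is_prime[i]:
--             primes.append(i)
--             mu[i] = -1
--         for p in primes:
--             if i * p > n:
--                 break
--             is_prime[i * p] = False
--             if i % p == 0:
--                 mu[i * p] = 0
--                 break
--             mu[i * p] = -mu[i]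
--     return mu
--
-- def C_brute(n: int):
--     """Count valid pairs by brute force."""
--     mu = mobius_sieve(n)
--     prefP = [0] * (n + 1)
--     prefN = [0] * (n + 1)
--     for i in range(1, n + 1):
--         prefP[i] = prefP[i - 1] + (1 if mu[i] == 1 else 0)
--         prefN[i] = prefN[i - 1] + (1 if mu[i] == -1 else 0)
--
--     count = 0
--     for a in range(1, n + 1):
--         for b in range(a, n + 1):
--             p = prefP[b] - prefP[a - 1]
--             nn = prefN[b] - prefN[a - 1]
--             if 99 * nn <= 100 * p and 99 * p <= 100 * nn:
--                 count += 1
--     return count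
-- ===== SOURCE B (Python) =====
-- def mobius_sieve(n: int) -> list:
--     """Compute mu(k) for k = 0..n."""
--     mu = [0] * (n + 1)
--     mu[1] = 1
--     is_prime = [True] * (n + 1)
--     primes = []
--     for i in range(2, n + 1):
--         if is_prime[i]:
--             primes.append(i)
--             mu[i] = -1
--         for p in primes:
--             if i * p > n:
--                 break
--             is_prime[i * p] = False
--             if i % p == 0:
--                 mu[i * p] = 0
--                 break
--             mu[i * p] = -mu[i]
--     return mu
--
-- def C_brute(n: int):
--     """Count valid pairs via a 2D-dominance sweep instead of the double loop.
--
--     The pair (a, b) is valid iff the point (100*prefP - 99*prefN, 100*prefN - 99*prefP)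
--     at index a-1 is dominated (<= in both coordinates) by the point at index b.
--     Sweep the points in order of increasing x (ties by index) and count, for each
--     point, the earlier points whose y-coordinate is <= its own, using a sorted list
--     with hand-rolled binary search."""
--     mu = mobius_sieve(n)
--     pts = [(0, 0)]
--     P = 0
--     N = 0
--     for i in range(1, n + 1):
--         if mu[i] == 1:
--             P += 1
--         elif mu[i] == -1:
--             N += 1
--         pts.append((100 * P - 99 * N, 100 * N - 99 * P))
--     order = sorted(range(n + 1), key=lambda i: (pts[i][0], i))
--     sl = []
--     count = 0
--     for j in order:
--         v = pts[j][1]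
--         lo = 0
--         hi = len(sl)
--         while lo < hi:
--             mid = (lo + hi) // 2
--             if sl[mid] <= v:
--                 lo = mid + 1
--             else:
--                 hi = mid
--         count += lo
--         sl.insert(lo, v)
--     return count
-- ===== Notes on version B (the rewrite author's own statement) =====
-- stated objective: faster
-- what changed: Replaces the O(n^2) double loop over (a,b) by a 2D-dominance sweep: each index gets the point (100*prefP-99*prefN, 100*prefN-99*prefP), the ratio condition becomes coordinate-wise dominance, and the indices are processed in order of increasing x while counting earlier y-values <= the current one in a binary-searched sorted list.
import Mathlib
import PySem

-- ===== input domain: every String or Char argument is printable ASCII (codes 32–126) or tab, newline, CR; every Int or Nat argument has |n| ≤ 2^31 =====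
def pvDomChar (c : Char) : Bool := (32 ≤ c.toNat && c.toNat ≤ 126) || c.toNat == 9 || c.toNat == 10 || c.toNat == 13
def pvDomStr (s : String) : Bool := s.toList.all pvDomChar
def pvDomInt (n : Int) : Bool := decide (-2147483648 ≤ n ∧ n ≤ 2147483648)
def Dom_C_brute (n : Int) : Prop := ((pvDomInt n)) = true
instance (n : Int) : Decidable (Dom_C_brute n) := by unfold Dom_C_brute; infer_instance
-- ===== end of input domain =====

-- B replaces A's O(n^2) double loop by a 2D-dominance sweep (sort by one coordinate,
-- count earlier smaller-or-equal other coordinates in a binary-searched sorted list): faster.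
-- Both implementations share the helper mobius_sieve verbatim; it is defined once here.

-- ===== PORT A =====
-- shared helper mobius_sieve; the inner `for p in primes` loop with its two `break`s:
def muInner (n i : Int) (muL : List Int) (isp : List Bool) : List Int → List Int × List Bool
  | [] => (muL, isp)
  | p :: ps =>
    if i * p > n then (muL, isp)
    else
      let isp' := PySem.List.pySetD isp (i * p) false
      if PySem.Int.mod i p = 0 then (PySem.List.pySetD muL (i * p) 0, isp')
      else muInner n i (PySem.List.pySetD muL (i * p) (-(PySem.List.pyGetD muL i 0))) isp' ps

def mobiusSieve (n : Int) : List Int :=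
  -- the `mu[1] = 1` assignment raises IndexError in Python when n ≤ 0; Pre_C_brute excludes those n
  let muL := PySem.List.pySetD (List.replicate (n + 1).toNat (0 : Int)) 1 1
  let isp := List.replicate (n + 1).toNat true
  let st := (PySem.List.pyRange 2 (n + 1) 1).foldl (fun st i =>
    let st' :=
      if PySem.List.pyGetD st.2.1 i true then
        (PySem.List.pySetD st.1 i (-1), st.2.1, st.2.2 ++ [i])
      else st
    let r := muInner n i st'.1 st'.2.1 st'.2.2
    (r.1, r.2, st'.2.2)) (muL, isp, ([] : List Int))
  st.1

-- body of A's first loop (building prefP/prefN)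
def aPrefStep (muL : List Int) (st : List Int × List Int) (i : Int) : List Int × List Int :=
  (PySem.List.pySetD st.1 i
      (PySem.List.pyGetD st.1 (i - 1) 0 + (if PySem.List.pyGetD muL i 0 = 1 then 1 else 0)),
   PySem.List.pySetD st.2 i
      (PySem.List.pyGetD st.2 (i - 1) 0 + (if PySem.List.pyGetD muL i 0 = -1 then 1 else 0)))

-- A's double counting loop
def aCount (prefP prefN : List Int) (n : Int) : Int :=
  (PySem.List.pyRange 1 (n + 1) 1).foldl (fun count a =>
    (PySem.List.pyRange a (n + 1) 1).foldl (fun count b =>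
      let p := PySem.List.pyGetD prefP b 0 - PySem.List.pyGetD prefP (a - 1) 0
      let nn := PySem.List.pyGetD prefN b 0 - PySem.List.pyGetD prefN (a - 1) 0
      if 99 * nn ≤ 100 * p ∧ 99 * p ≤ 100 * nn then count + 1 else count) count) 0

def C_brute (n : Int) : Int :=
  let muL := mobiusSieve n
  let pr := (PySem.List.pyRange 1 (n + 1) 1).foldl (aPrefStep muL)
      (List.replicate (n + 1).toNat 0, List.replicate (n + 1).toNat 0)
  aCount pr.1 pr.2 n

-- ===== PORT B =====
-- body of B's points loop (running prefix counters P and N)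
def bPtsStep (muL : List Int) (st : List (Int × Int) × Int × Int) (i : Int) :
    List (Int × Int) × Int × Int :=
  let P := if PySem.List.pyGetD muL i 0 = 1 then st.2.1 + 1 else st.2.1
  let N := if PySem.List.pyGetD muL i 0 = 1 then st.2.2
           else if PySem.List.pyGetD muL i 0 = -1 then st.2.2 + 1 else st.2.2
  (st.1 ++ [(100 * P - 99 * N, 100 * N - 99 * P)], P, N)

-- B's hand-written `while lo < hi` binary search
def bSearch (sl : List Int) (v lo hi : Int) : Int :=
  if h : lo < hi then
    let mid := PySem.Int.floordiv (lo + hi) 2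
    if PySem.List.pyGetD sl mid 0 ≤ v then bSearch sl v (mid + 1) hi
    else bSearch sl v lo mid
  else lo
termination_by (hi - lo).toNat
decreasing_by
  · have := PySem.Int.floordiv_two_mid_bounds (le_of_lt h)
    omega
  · have h1 : PySem.Int.floordiv (lo + hi) 2 < hi := by
      rw [PySem.Int.floordiv_lt_iff_lt_mul (by norm_num)]; omega
    have := PySem.Int.floordiv_two_mid_bounds (le_of_lt h)
    omega

-- body of B's sweep loop
def bSweepStep (pts : List (Int × Int)) (st : List Int × Int) (j : Int) : List Int × Int :=
  let v := (PySem.List.pyGetD pts j (0, 0)).2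
  let lo := bSearch st.1 v 0 (st.1.length : Int)
  (PySem.List.insert st.1 lo v, st.2 + lo)

def C_brute_alt (n : Int) : Int :=
  let muL := mobiusSieve n
  let st := (PySem.List.pyRange 1 (n + 1) 1).foldl (bPtsStep muL) ([(0, 0)], 0, 0)
  let pts := st.1
  let order := PySem.List.sorted2 (PySem.List.pyRange 0 (n + 1) 1)
      (fun i => (PySem.List.pyGetD pts i (0, 0)).1) (fun i => i)
  (order.foldl (bSweepStep pts) ([], 0)).2

-- ===== PRECONDITION & SPEC =====
-- Python A (and B) raise IndexError for n ≤ 0 (the mu-list is then too short for the first assignment)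
def Pre_C_brute (n : Int) : Prop := 1 ≤ n
instance (n : Int) : Decidable (Pre_C_brute n) := by unfold Pre_C_brute; infer_instance
def pvWitness_C_brute : Int := 3

def Spec_C_brute (n : Int) (out : Int) : Prop := out = C_brute_alt n
instance (n : Int) (out : Int) : Decidable (Spec_C_brute n out) := by unfold Spec_C_brute; infer_instance

-- ===== CLAIM (what is proved, stated in full; the proofs are below) =====
def Claim_equal_C_brute : Prop := ∀ (n : Int), Dom_C_brute n → Pre_C_brute n → Spec_C_brute n (C_brute n)

-- ===== LEMMAS AND PROOFS =====

-- abstract view of the shared mu list: both ports read it only through pyGetD _ i 0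
def gOf (muL : List Int) (k : Nat) : Int := PySem.List.pyGetD muL (k : Int) 0
-- prefix counters of mu-values 1 / -1 on [1..k]
def ppF (g : Nat → Int) : Nat → Int
  | 0 => 0
  | k + 1 => ppF g k + (if g (k + 1) = 1 then 1 else 0)
def pnF (g : Nat → Int) : Nat → Int
  | 0 => 0
  | k + 1 => pnF g k + (if g (k + 1) = -1 then 1 else 0)
-- the two point coordinates
def xIf (g : Nat → Int) (i : Int) : Int := 100 * ppF g i.toNat - 99 * pnF g i.toNat
def yIf (g : Nat → Int) (i : Int) : Int := 100 * pnF g i.toNat - 99 * ppF g i.toNat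
-- counting ordered pairs (earlier, later) of a list satisfying R
def pc (R : Int → Int → Bool) : List Int → Int
  | [] => 0
  | c :: t => (t.countP (R c) : Int) + pc R t
-- the sweep's running count, seen-multiset first
def Hc (Yf : Int → Int) (seen : List Int) : List Int → Int
  | [] => 0
  | j :: t => (seen.countP (fun w => decide (w ≤ Yf j)) : Int) + Hc Yf (Yf j :: seen) t

lemma ppF_mono (g : Nat → Int) {i j : Nat} (h : i ≤ j) : ppF g i ≤ ppF g j := by
  induction j, h using Nat.le_induction with
  | base => exact le_refl _
  | succ m hm ih => simp only [ppF]; split_ifs <;> omega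
lemma pnF_mono (g : Nat → Int) {i j : Nat} (h : i ≤ j) : pnF g i ≤ pnF g j := by
  induction j, h using Nat.le_induction with
  | base => exact le_refl _
  | succ m hm ih => simp only [pnF]; split_ifs <;> omega

-- A's prefix-array loop computes ppF/pnF
lemma prefInv (muL : List Int) (L j : Nat) (hj : j < L) :
    ((PySem.List.pyRange 1 ((j : Int) + 1) 1).foldl (aPrefStep muL)
        (List.replicate L (0 : Int), List.replicate L (0 : Int))).1.length = L ∧
    ((PySem.List.pyRange 1 ((j : Int) + 1) 1).foldl (aPrefStep muL)
        (List.replicate L (0 : Int), List.replicate L (0 : Int))).2.length = L ∧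
    ∀ k : Nat, k ≤ j →
      ((PySem.List.pyRange 1 ((j : Int) + 1) 1).foldl (aPrefStep muL)
        (List.replicate L (0 : Int), List.replicate L (0 : Int))).1.getD k 0 = ppF (gOf muL) k ∧
      ((PySem.List.pyRange 1 ((j : Int) + 1) 1).foldl (aPrefStep muL)
        (List.replicate L (0 : Int), List.replicate L (0 : Int))).2.getD k 0 = pnF (gOf muL) k := by
  induction j with
  | zero =>
    simp only [Nat.cast_zero, zero_add]
    rw [PySem.List.pyRange_one_eq_nil (by norm_num)]
    simp only [List.foldl_nil]
    refine ⟨by simp, by simp, ?_⟩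
    intro k hk
    have : k = 0 := Nat.le_zero.mp hk
    subst this
    exact ⟨List.getD_replicate 0 (by omega), List.getD_replicate 0 (by omega)⟩
  | succ j ih =>
    have ihr := ih (by omega)
    set st := (PySem.List.pyRange 1 ((j : Int) + 1) 1).foldl (aPrefStep muL)
      (List.replicate L (0 : Int), List.replicate L (0 : Int)) with hstdef
    obtain ⟨hl1, hl2, hk⟩ := ihr
    have hsplit : PySem.List.pyRange 1 (((j + 1 : Nat) : Int) + 1) 1 =
        PySem.List.pyRange 1 ((j : Int) + 1) 1 ++ [(j : Int) + 1] := by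
      push_cast
      exact PySem.List.pyRange_one_succ_right (by omega)
    rw [hsplit, List.foldl_concat, ← hstdef]
    have hcast : (j : Int) + 1 = ((j + 1 : Nat) : Int) := by push_cast; ring
    have hcast2 : ((j + 1 : Nat) : Int) - 1 = ((j : Nat) : Int) := by push_cast; ring
    have hgof : PySem.List.pyGetD muL ((j + 1 : Nat) : Int) 0 = gOf muL (j + 1) := rfl
    have hval1 : PySem.List.pyGetD st.1 (((j + 1 : Nat) : Int) - 1) 0 +
        (if PySem.List.pyGetD muL ((j + 1 : Nat) : Int) 0 = 1 then 1 else 0) =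
        ppF (gOf muL) (j + 1) := by
      rw [hcast2, PySem.List.pyGetD_natCast, (hk j (le_refl j)).1, hgof]
      simp [ppF]
    have hval2 : PySem.List.pyGetD st.2 (((j + 1 : Nat) : Int) - 1) 0 +
        (if PySem.List.pyGetD muL ((j + 1 : Nat) : Int) 0 = -1 then 1 else 0) =
        pnF (gOf muL) (j + 1) := by
      rw [hcast2, PySem.List.pyGetD_natCast, (hk j (le_refl j)).2, hgof]
      simp [pnF]
    simp only [aPrefStep, hcast, hval1, hval2]
    refine ⟨?_, ?_, ?_⟩
    · rw [PySem.List.pySetD_natCast, List.length_set]; exact hl1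
    · rw [PySem.List.pySetD_natCast, List.length_set]; exact hl2
    · intro k hkj
      have hlen1 : j + 1 < st.1.length := by omega
      have hlen2 : j + 1 < st.2.length := by omega
      have hg1 := PySem.List.pyGetD_pySetD_natCast st.1 (j + 1) k (ppF (gOf muL) (j + 1)) 0 hlen1
      have hg2 := PySem.List.pyGetD_pySetD_natCast st.2 (j + 1) k (pnF (gOf muL) (j + 1)) 0 hlen2
      constructor
      · rw [← PySem.List.pyGetD_natCast (PySem.List.pySetD st.1 ((j+1 : Nat) : Int)
          (ppF (gOf muL) (j + 1))) k 0, hg1]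
        by_cases hke : k = j + 1
        · simp [hke]
        · rw [if_neg hke, PySem.List.pyGetD_natCast]
          exact (hk k (by omega)).1

      · rw [← PySem.List.pyGetD_natCast (PySem.List.pySetD st.2 ((j+1 : Nat) : Int)
          (pnF (gOf muL) (j + 1))) k 0, hg2]
        by_cases hke : k = j + 1
        · simp [hke]
        · rw [if_neg hke, PySem.List.pyGetD_natCast]
          exact (hk k (by omega)).2


-- pc congruence along a Pairwise fact
lemma pc_congr {R R' : Int → Int → Bool} : ∀ {l : List Int},
    l.Pairwise (fun a b => R a b = R' a b) → pc R l = pc R' l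
  | [], _ => rfl
  | c :: t, h => by
    rw [List.pairwise_cons] at h
    have hc : List.countP (R c) t = List.countP (R' c) t :=
      List.countP_congr (fun x hx => by rw [h.1 x hx])
    simp only [pc, hc, pc_congr h.2]

-- pc of a symmetric relation is permutation-invariant
lemma pc_perm {R : Int → Int → Bool} (hs : ∀ a b, R a b = R b a) {l l' : List Int}
    (hp : l.Perm l') : pc R l = pc R l' := by
  induction hp with
  | nil => rfl
  | cons x h ih => simp only [pc, h.countP_eq, ih]
  | swap x y t => simp only [pc, List.countP_cons, hs x y]; omega
  | trans h1 h2 ih1 ih2 => omega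

-- A's double loop (as a sum over outer indices) is pc over the whole range
lemma pc_pyRange (R : Int → Int → Bool) : ∀ (m : Nat) (a b : Int), (b - a).toNat = m →
    pc R (PySem.List.pyRange a b 1) =
      ((PySem.List.pyRange (a + 1) b 1).map
        (fun t => (((PySem.List.pyRange t b 1).countP (R (t - 1)) : Nat) : Int))).sum := by
  intro m
  induction m with
  | zero =>
    intro a b h
    rw [PySem.List.pyRange_one_eq_nil (by omega), PySem.List.pyRange_one_eq_nil (by omega)]
    rfl
  | succ m ih =>
    intro a b h
    rw [PySem.List.pyRange_one_cons (by omega)]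
    simp only [pc]
    rw [ih (a + 1) b (by omega)]
    by_cases hab : a + 1 < b
    · conv_rhs => rw [PySem.List.pyRange_one_cons hab]
      rw [List.map_cons, List.sum_cons]
      have h1 : a + 1 - 1 = a := by omega
      rw [h1]
    · rw [PySem.List.pyRange_one_eq_nil (show b ≤ a + 1 by omega),
        PySem.List.pyRange_one_eq_nil (show b ≤ a + 1 + 1 by omega)]
      simp

-- a list whose first r entries are ≤ v and whose remaining entries are > v has countP (≤ v) = r
lemma countP_of_cut (sl : List Int) (v : Int) (r : Nat) (hr : r ≤ sl.length)
    (h1 : ∀ k : Nat, k < r → sl.getD k 0 ≤ v)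
    (h2 : ∀ k : Nat, r ≤ k → k < sl.length → ¬ sl.getD k 0 ≤ v) :
    sl.countP (fun w => decide (w ≤ v)) = r := by
  conv_lhs => rw [← List.take_append_drop r sl]
  rw [List.countP_append]
  have ht : (sl.take r).countP (fun w => decide (w ≤ v)) = r := by
    have hlen : (sl.take r).length = r := by simp [List.length_take]; omega
    have hall : ∀ a ∈ sl.take r, decide (a ≤ v) = true := by
      intro a ha
      rcases List.mem_iff_getElem.mp ha with ⟨i, hi, rfl⟩
      have hir : i < r := by simpa [hlen] using hi
      have hig : (sl.take r)[i] = sl[i] := List.getElem_take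
      have hil : i < sl.length := by omega
      have := h1 i hir
      rw [List.getD_eq_getElem sl 0 hil] at this
      rw [hig]
      simpa using this
    exact (List.countP_eq_length.mpr hall).trans hlen
  have hd : (sl.drop r).countP (fun w => decide (w ≤ v)) = 0 := by
    rw [List.countP_eq_zero]
    intro a ha
    rcases List.mem_iff_getElem.mp ha with ⟨i, hi, rfl⟩
    have hil : r + i < sl.length := by
      have := hi; simp [List.length_drop] at this; omega
    have : (sl.drop r)[i] = sl[r + i] := by
      rw [List.getElem_drop]
    rw [this]
    have h2' := h2 (r + i) (by omega) hil
    rw [List.getD_eq_getElem sl 0 hil] at h2'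
    simpa using h2'
  omega

-- index-wise monotonicity of a sorted list, getD form
lemma sorted_getD_mono (sl : List Int) (hs : sl.Pairwise (· ≤ ·)) (p q : Nat)
    (hpq : p ≤ q) (hq : q < sl.length) : sl.getD p 0 ≤ sl.getD q 0 := by
  rcases eq_or_lt_of_le hpq with rfl | hlt
  · exact le_refl _
  · have hp : p < sl.length := by omega
    rw [List.getD_eq_getElem sl 0 hp, List.getD_eq_getElem sl 0 hq]
    exact List.pairwise_iff_getElem.mp hs p q hp hq hlt

-- the binary-search loop, with its invariant
lemma bSearch_go (sl : List Int) (v : Int) (hs : sl.Pairwise (· ≤ ·)) :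
    ∀ (m : Nat) (lo hi : Int), (hi - lo).toNat = m → 0 ≤ lo → lo ≤ hi →
    hi ≤ (sl.length : Int) →
    (∀ k : Nat, k < lo.toNat → sl.getD k 0 ≤ v) →
    (∀ k : Nat, hi.toNat ≤ k → k < sl.length → ¬ sl.getD k 0 ≤ v) →
    bSearch sl v lo hi = ((sl.countP (fun w => decide (w ≤ v)) : Nat) : Int) := by
  intro m
  induction m using Nat.strong_induction_on with
  | _ m ih =>
    intro lo hi hm h0 hlohi hhi h1 h2
    by_cases hlh : lo < hi
    · rw [bSearch, dif_pos hlh]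
      show (if PySem.List.pyGetD sl (PySem.Int.floordiv (lo + hi) 2) 0 ≤ v then
          bSearch sl v (PySem.Int.floordiv (lo + hi) 2 + 1) hi
        else bSearch sl v lo (PySem.Int.floordiv (lo + hi) 2)) =
        ((sl.countP (fun w => decide (w ≤ v)) : Nat) : Int)
      have hb := PySem.Int.floordiv_two_mid_bounds (le_of_lt hlh)
      have hltm : PySem.Int.floordiv (lo + hi) 2 < hi := by
        rw [PySem.Int.floordiv_lt_iff_lt_mul (by norm_num)]; omega
      set mid := PySem.Int.floordiv (lo + hi) 2 with hmid
      have hmid0 : 0 ≤ mid := by omega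
      have hmidlen : mid.toNat < sl.length := by omega
      rw [PySem.List.pyGetD_of_nonneg sl 0 hmid0]
      by_cases hv : sl.getD mid.toNat 0 ≤ v
      · rw [if_pos hv]
        refine ih (hi - (mid + 1)).toNat (by omega) (mid + 1) hi rfl (by omega)
          (by omega) hhi ?_ h2
        intro k hk
        have hk' : k ≤ mid.toNat := by omega
        exact le_trans (sorted_getD_mono sl hs k mid.toNat hk' hmidlen) hv
      · rw [if_neg hv]
        refine ih (mid - lo).toNat (by omega) lo mid rfl h0 (by omega) (by omega) h1 ?_
        intro k hk hkl
        have := sorted_getD_mono sl hs mid.toNat k (by omega) hkl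
        omega
    · rw [bSearch, dif_neg hlh]
      have hcp : sl.countP (fun w => decide (w ≤ v)) = lo.toNat := by
        refine countP_of_cut sl v lo.toNat (by omega) h1 ?_
        intro k hk hkl
        exact h2 k (by omega) hkl
      rw [hcp]
      omega

-- binary search on a sorted list returns the number of elements ≤ v
lemma bSearch_spec (sl : List Int) (v : Int) (hs : sl.Pairwise (· ≤ ·)) :
    bSearch sl v 0 (sl.length : Int) = (sl.countP (fun w => decide (w ≤ v)) : Int) := by
  refine bSearch_go sl v hs (sl.length : Int).toNat 0 (sl.length : Int) (by omega)
    (by omega) (by omega) (by omega) (by omega) ?_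
  intro k hk hkl
  omega

-- on a sorted list, the first countP (≤ v) entries are ≤ v and the rest are > v
lemma sorted_cut (v : Int) : ∀ (sl : List Int), sl.Pairwise (· ≤ ·) →
    (∀ a ∈ sl.take (sl.countP (fun w => decide (w ≤ v))), a ≤ v) ∧
    (∀ a ∈ sl.drop (sl.countP (fun w => decide (w ≤ v))), ¬ a ≤ v)
  | [], _ => by simp
  | w :: t, hp => by
    rw [List.pairwise_cons] at hp
    by_cases hw : w ≤ v
    · have hc : (w :: t).countP (fun w => decide (w ≤ v)) =
          t.countP (fun w => decide (w ≤ v)) + 1 := by simp [hw]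
      rw [hc]
      constructor
      · intro a ha
        rw [List.take_succ_cons] at ha
        rcases List.mem_cons.mp ha with rfl | ha'
        · exact hw
        · exact (sorted_cut v t hp.2).1 a ha'
      · intro a ha
        rw [List.drop_succ_cons] at ha
        exact (sorted_cut v t hp.2).2 a ha
    · have hall : ∀ a ∈ w :: t, ¬ (decide (a ≤ v) = true) := by
        intro a ha
        rcases List.mem_cons.mp ha with rfl | ha'
        · simpa using hw
        · have := hp.1 a ha'
          simp only [decide_eq_true_eq]
          omega
      have hc : (w :: t).countP (fun w => decide (w ≤ v)) = 0 := List.countP_eq_zero.mpr hall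
      rw [hc]
      refine ⟨by simp, fun a ha => ?_⟩
      simpa using hall a (by simpa using ha)

-- inserting v at position countP (≤ v) keeps the list sorted and adds v
lemma insert_sorted (sl : List Int) (v : Int) (hs : sl.Pairwise (· ≤ ·)) :
    (PySem.List.insert sl ((sl.countP (fun w => decide (w ≤ v)) : Nat) : Int) v).Pairwise (· ≤ ·) ∧
    (PySem.List.insert sl ((sl.countP (fun w => decide (w ≤ v)) : Nat) : Int) v).Perm (v :: sl) := by
  set r := sl.countP (fun w => decide (w ≤ v)) with hrdef
  have hr : r ≤ sl.length := List.countP_le_length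
  rw [PySem.List.insert_natCast sl r v hr]
  have hcut := sorted_cut v sl hs
  rw [← hrdef] at hcut
  constructor
  · rw [List.pairwise_append]
    refine ⟨hs.sublist (List.take_sublist r sl), ?_, ?_⟩
    · rw [List.pairwise_cons]
      exact ⟨fun b hb => by have := hcut.2 b hb; omega, hs.sublist (List.drop_sublist r sl)⟩
    · intro a ha b hb
      have hav := hcut.1 a ha
      rcases List.mem_cons.mp hb with rfl | hb'
      · exact hav
      · have := hcut.2 b hb'; omega
  · exact List.perm_middle.trans (by rw [List.take_append_drop])

lemma Hc_perm (Yf : Int → Int) : ∀ (l seen seen' : List Int), seen.Perm seen' →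
    Hc Yf seen l = Hc Yf seen' l
  | [], _, _, _ => rfl
  | j :: t, seen, seen', hp => by
    simp only [Hc, hp.countP_eq, Hc_perm Yf t _ _ (hp.cons (Yf j))]

lemma Hc_eq_pc (Yf : Int → Int) : ∀ (l seen : List Int),
    Hc Yf seen l = pc (fun i j => decide (Yf i ≤ Yf j)) l +
      ((l.map (fun j => (seen.countP (fun w => decide (w ≤ Yf j)) : Int))).sum)
  | [], seen => by simp [Hc, pc]
  | c :: t, seen => by
    have h1 : ∀ j : Int,
        (((Yf c :: seen).countP (fun w => decide (w ≤ Yf j)) : Nat) : Int) =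
          (seen.countP (fun w => decide (w ≤ Yf j)) : Int) +
            (if Yf c ≤ Yf j then 1 else 0) := by
      intro j; by_cases hle : Yf c ≤ Yf j <;> simp [hle]
    have hmap : List.map
          (fun j => (((Yf c :: seen).countP (fun w => decide (w ≤ Yf j)) : Nat) : Int)) t
        = List.map (fun j => (seen.countP (fun w => decide (w ≤ Yf j)) : Int) +
            (if Yf c ≤ Yf j then 1 else 0)) t :=
      List.map_congr_left (fun j _ => h1 j)
    have hadd := PySem.List.sum_map_add_int t
      (fun j => ((seen.countP (fun w => decide (w ≤ Yf j)) : Nat) : Int))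
      (fun j => (if Yf c ≤ Yf j then (1:Int) else 0))
    have hcnt := PySem.List.sum_map_ite_one_zero (fun j => decide (Yf c ≤ Yf j)) t
    simp only [decide_eq_true_eq] at hcnt
    simp only [Hc, Hc_eq_pc Yf t (Yf c :: seen), pc, List.map_cons, List.sum_cons,
      hmap, hadd, hcnt]
    omega

-- the sweep loop accumulates Hc
lemma sweepInv (pts : List (Int × Int)) : ∀ (l : List Int) (sl : List Int) (cnt : Int),
    sl.Pairwise (· ≤ ·) →
    (l.foldl (bSweepStep pts) (sl, cnt)).2 =
      cnt + Hc (fun j => (PySem.List.pyGetD pts j (0, 0)).2) sl l := by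
  intro l
  induction l with
  | nil => intro sl cnt _; simp [Hc]
  | cons j t ih =>
    intro sl cnt hs
    set v := (PySem.List.pyGetD pts j (0, 0)).2 with hv
    have hbs := bSearch_spec sl v hs
    have hins := insert_sorted sl v hs
    have hstep : bSweepStep pts (sl, cnt) j =
        (PySem.List.insert sl ((sl.countP (fun w => decide (w ≤ v)) : Nat) : Int) v,
          cnt + ((sl.countP (fun w => decide (w ≤ v)) : Nat) : Int)) := by
      simp only [bSweepStep, ← hv, hbs]
    rw [List.foldl_cons, hstep, ih _ _ hins.1, Hc_perm _ t _ _ (hins.2)]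
    simp only [Hc, ← hv]
    omega

-- insertion sort produces a Pairwise-ordered list, for a strict total order test
lemma insertBy_pairwise (bt : Int → Int → Bool)
    (htrans : ∀ a b c, bt a b = true → bt b c = true → bt a c = true)
    (htot : ∀ a b, a ≠ b → bt a b = true ∨ bt b a = true) :
    ∀ (acc : List Int) (x : Int), (∀ a ∈ acc, a ≠ x) → acc.Pairwise (bt · · = true) →
      (PySem.List.insertBy bt x acc).Pairwise (bt · · = true) := by
  intro acc
  induction acc with
  | nil => intro x _ _; simp [PySem.List.insertBy]
  | cons y ys ih =>
    intro x hx hp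
    rw [List.pairwise_cons] at hp
    by_cases hbt : bt x y = true
    · have he : PySem.List.insertBy bt x (y :: ys) = x :: y :: ys := by
        simp [PySem.List.insertBy, hbt]
      rw [he, List.pairwise_cons]
      refine ⟨fun z hz => ?_, List.pairwise_cons.mpr hp⟩
      rcases List.mem_cons.mp hz with rfl | hz'
      · exact hbt
      · exact htrans x y z hbt (hp.1 z hz')
    · have he : PySem.List.insertBy bt x (y :: ys) = y :: PySem.List.insertBy bt x ys := by
        simp [PySem.List.insertBy, hbt]
      rw [he, List.pairwise_cons]
      constructor
      · intro z hz
        rcases (PySem.List.mem_insertBy bt x z ys).mp hz with rfl | hz'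
        · rcases htot y z (hx y List.mem_cons_self) with h | h
          · exact h
          · exact absurd h hbt
        · exact hp.1 z hz'
      · exact ih x (fun a ha => hx a (List.mem_cons_of_mem y ha)) hp.2

lemma foldl_insertBy_pairwise (bt : Int → Int → Bool)
    (htrans : ∀ a b c, bt a b = true → bt b c = true → bt a c = true)
    (htot : ∀ a b, a ≠ b → bt a b = true ∨ bt b a = true) :
    ∀ (l acc : List Int), l.Nodup → (∀ a ∈ acc, ∀ b ∈ l, a ≠ b) →
      acc.Pairwise (bt · · = true) →
      (l.foldl (fun acc x => PySem.List.insertBy bt x acc) acc).Pairwise (bt · · = true) := by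
  intro l
  induction l with
  | nil => intro acc _ _ hp; exact hp
  | cons x t ih =>
    intro acc hnd hdisj hp
    rw [List.nodup_cons] at hnd
    rw [List.foldl_cons]
    refine ih _ hnd.2 ?_ (insertBy_pairwise bt htrans htot acc x
      (fun a ha => hdisj a ha x List.mem_cons_self) hp)
    intro a ha b hb
    rcases (PySem.List.mem_insertBy bt x a acc).mp ha with rfl | ha'
    · exact fun hc => hnd.1 (hc ▸ hb)
    · exact hdisj a ha' b (List.mem_cons_of_mem x hb)

-- B's points loop
lemma bPtsInv (muL : List Int) : ∀ (j : Nat),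
    (PySem.List.pyRange 1 ((j : Int) + 1) 1).foldl (bPtsStep muL) ([(0, 0)], 0, 0) =
      ((List.range (j + 1)).map (fun k : Nat => (xIf (gOf muL) (k : Int), yIf (gOf muL) (k : Int))),
        ppF (gOf muL) j, pnF (gOf muL) j) := by
  intro j
  induction j with
  | zero =>
    rw [PySem.List.pyRange_one_eq_nil (by norm_num)]
    simp [ppF, pnF, xIf, yIf]
  | succ j ih =>
    have hsplit : PySem.List.pyRange 1 (((j + 1 : Nat) : Int) + 1) 1 =
        PySem.List.pyRange 1 ((j : Int) + 1) 1 ++ [(j : Int) + 1] := by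
      push_cast
      exact PySem.List.pyRange_one_succ_right (by omega)
    rw [hsplit, List.foldl_concat, ih]
    have hg : PySem.List.pyGetD muL ((j : Int) + 1) 0 = gOf muL (j + 1) := by
      unfold gOf; push_cast; rfl
    simp only [bPtsStep, hg]
    have hP : (if gOf muL (j + 1) = 1 then ppF (gOf muL) j + 1 else ppF (gOf muL) j) =
        ppF (gOf muL) (j + 1) := by
      simp only [ppF]; split_ifs <;> omega
    have hN : (if gOf muL (j + 1) = 1 then pnF (gOf muL) j
        else if gOf muL (j + 1) = -1 then pnF (gOf muL) j + 1 else pnF (gOf muL) j) =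
        pnF (gOf muL) (j + 1) := by
      simp only [pnF]; split_ifs <;> omega
    rw [hP, hN]
    simp [List.range_succ, xIf, yIf]

-- the comparison used by B's sort: lexicographic on (X i, i); a strict total order
def btOf (X : Int → Int) (a b : Int) : Bool :=
  decide (X a < X b) || (!decide (X b < X a) && decide (a < b))

lemma btOf_trans (X : Int → Int) (a b c : Int) (h1 : btOf X a b = true)
    (h2 : btOf X b c = true) : btOf X a c = true := by
  simp only [btOf, Bool.or_eq_true, Bool.and_eq_true, Bool.not_eq_eq_eq_not, Bool.not_true,
    decide_eq_true_eq, decide_eq_false_iff_not] at *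
  rcases h1 with h1 | ⟨h1a, h1b⟩ <;> rcases h2 with h2 | ⟨h2a, h2b⟩ <;> [left; left; left; right] <;>
    omega

lemma btOf_total (X : Int → Int) (a b : Int) (h : a ≠ b) :
    btOf X a b = true ∨ btOf X b a = true := by
  simp only [btOf, Bool.or_eq_true, Bool.and_eq_true, Bool.not_eq_eq_eq_not, Bool.not_true,
    decide_eq_true_eq, decide_eq_false_iff_not]
  by_cases hx : X a < X b
  · exact Or.inl (Or.inl hx)
  · by_cases hx' : X b < X a
    · exact Or.inr (Or.inl hx')
    · rcases lt_or_gt_of_ne h with hab | hab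
      · exact Or.inl (Or.inr ⟨hx', hab⟩)
      · exact Or.inr (Or.inr ⟨hx, hab⟩)

lemma btOf_asymm (X : Int → Int) (a b : Int) (h : btOf X a b = true) : btOf X b a = false := by
  simp only [btOf, Bool.or_eq_true, Bool.and_eq_true, Bool.not_eq_eq_eq_not, Bool.not_true,
    decide_eq_true_eq, decide_eq_false_iff_not] at h ⊢
  rcases h with h | ⟨h1, h2⟩
  · simp only [Bool.or_eq_false_iff, Bool.and_eq_false_iff]
    constructor
    · simpa using by omega
    · left; simpa using by omega
  · simp only [Bool.or_eq_false_iff, Bool.and_eq_false_iff]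
    constructor
    · simpa using h1
    · right; simpa using by omega

-- ===== VERDICT (by name: the statement is the Claim_ definition above) =====
theorem C_brute_spec : Claim_equal_C_brute := by
  intro n _ hpre
  unfold Pre_C_brute at hpre
  unfold Spec_C_brute
  obtain ⟨N, rfl⟩ : ∃ N : Nat, n = (N : Int) := ⟨n.toNat, (Int.toNat_of_nonneg (by omega)).symm⟩
  have hN1 : (((N : Int)) + 1).toNat = N + 1 := by omega
  set muL := mobiusSieve (N : Int) with hmuL
  set g := gOf muL with hg
  set rng := PySem.List.pyRange 0 ((N : Int) + 1) 1 with hrng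
  set Rfin : Int → Int → Bool :=
    fun i j => decide (xIf g i ≤ xIf g j ∧ yIf g i ≤ yIf g j) with hRfin
  -- ===== A side =====
  have hpref := prefInv muL (N + 1) N (by omega)
  obtain ⟨hl1, hl2, hk⟩ := hpref
  set P := (PySem.List.pyRange 1 ((N : Int) + 1) 1).foldl (aPrefStep muL)
      (List.replicate (N + 1) (0 : Int), List.replicate (N + 1) (0 : Int)) with hP
  have hA : C_brute (N : Int) = pc Rfin rng := by
    have hgetP : ∀ i : Int, 0 ≤ i → i ≤ (N : Int) →
        PySem.List.pyGetD P.1 i 0 = ppF g i.toNat ∧ PySem.List.pyGetD P.2 i 0 = pnF g i.toNat := by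
      intro i h0 hiN
      have h1 : i.toNat ≤ N := by omega
      rw [PySem.List.pyGetD_of_nonneg P.1 0 h0, PySem.List.pyGetD_of_nonneg P.2 0 h0]
      exact hk i.toNat h1
    have houter : ∀ (count : Int), ∀ a ∈ PySem.List.pyRange 1 ((N : Int) + 1) 1,
        (PySem.List.pyRange a ((N : Int) + 1) 1).foldl (fun count b =>
          let p := PySem.List.pyGetD P.1 b 0 - PySem.List.pyGetD P.1 (a - 1) 0
          let nn := PySem.List.pyGetD P.2 b 0 - PySem.List.pyGetD P.2 (a - 1) 0
          if 99 * nn ≤ 100 * p ∧ 99 * p ≤ 100 * nn then count + 1 else count) count =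
        count + (((PySem.List.pyRange a ((N : Int) + 1) 1).countP (Rfin (a - 1)) : Nat) : Int) := by
      intro count a ha
      rw [PySem.List.mem_pyRange_one] at ha
      rw [PySem.List.foldl_ite_add_one (p := fun b =>
        99 * (PySem.List.pyGetD P.2 b 0 - PySem.List.pyGetD P.2 (a - 1) 0) ≤
          100 * (PySem.List.pyGetD P.1 b 0 - PySem.List.pyGetD P.1 (a - 1) 0) ∧
        99 * (PySem.List.pyGetD P.1 b 0 - PySem.List.pyGetD P.1 (a - 1) 0) ≤
          100 * (PySem.List.pyGetD P.2 b 0 - PySem.List.pyGetD P.2 (a - 1) 0))]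
      congr 1
      congr 1
      apply List.countP_congr
      intro b hb
      rw [PySem.List.mem_pyRange_one] at hb
      obtain ⟨hpa, hna⟩ := hgetP (a - 1) (by omega) (by omega)
      obtain ⟨hpb, hnb⟩ := hgetP b (by omega) (by omega)
      rw [hpa, hna, hpb, hnb, hRfin]
      simp only [decide_eq_true_eq, xIf, yIf]
      omega
    show aCount P.1 P.2 (N : Int) = pc Rfin rng
    unfold aCount
    rw [PySem.List.foldl_congr_mem _ _
      (fun count a => count + (((PySem.List.pyRange a ((N : Int) + 1) 1).countP (Rfin (a - 1)) : Nat) : Int))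
      0 houter]
    rw [PySem.List.foldl_add _ (fun a => (((PySem.List.pyRange a ((N : Int) + 1) 1).countP (Rfin (a - 1)) : Nat) : Int)) 0]
    rw [hrng, pc_pyRange Rfin (N + 1) 0 ((N : Int) + 1) (by omega)]
    simp
  -- ===== B side =====
  have hpts := bPtsInv muL N
  set pts := (List.range (N + 1)).map (fun k : Nat => (xIf g (k : Int), yIf g (k : Int))) with hpts_def
  set XF : Int → Int := fun i => (PySem.List.pyGetD pts i (0, 0)).1 with hXF
  set YF : Int → Int := fun i => (PySem.List.pyGetD pts i (0, 0)).2 with hYF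
  set bt : Int → Int → Bool := btOf XF with hbt
  have hXY : ∀ i : Int, 0 ≤ i → i ≤ (N : Int) → XF i = xIf g i ∧ YF i = yIf g i := by
    intro i h0 hiN
    have hlt : i.toNat < N + 1 := by omega
    have : PySem.List.pyGetD pts i (0, 0) = (xIf g (i.toNat : Int), yIf g (i.toNat : Int)) := by
      rw [PySem.List.pyGetD_of_nonneg pts (0, 0) h0, hpts_def,
        PySem.List.getD_map_range _ (N + 1) i.toNat (0, 0) hlt]
    rw [hXF, hYF]
    simp only [this]
    constructor <;> simp only [xIf, yIf, Int.toNat_natCast]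
  set order := PySem.List.sorted2 rng (fun i => (PySem.List.pyGetD pts i (0, 0)).1)
      (fun i => i) with horder_def
  have horder : order = rng.foldl (fun acc x => PySem.List.insertBy bt x acc) [] := rfl
  have hperm : order.Perm rng := PySem.List.sorted2_perm rng _ _ false
  have hpair : order.Pairwise (bt · · = true) := by
    rw [horder]
    exact foldl_insertBy_pairwise bt (btOf_trans XF) (btOf_total XF) rng []
      (PySem.List.nodup_pyRange_one 0 ((N : Int) + 1)) (by simp) List.Pairwise.nil
  have hB : C_brute_alt (N : Int) = pc (fun i j => decide (YF i ≤ YF j)) order := by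
    show ((PySem.List.sorted2 (PySem.List.pyRange 0 ((N : Int) + 1) 1)
        (fun i => (PySem.List.pyGetD ((PySem.List.pyRange 1 ((N : Int) + 1) 1).foldl
          (bPtsStep muL) ([(0, 0)], 0, 0)).1 i (0, 0)).1) (fun i => i)).foldl
        (bSweepStep ((PySem.List.pyRange 1 ((N : Int) + 1) 1).foldl
          (bPtsStep muL) ([(0, 0)], 0, 0)).1) ([], 0)).2 = _
    rw [hpts]
    dsimp only
    have hsw := sweepInv pts order [] 0 List.Pairwise.nil
    rw [hsw, Hc_eq_pc]
    simp [hYF]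
  -- ===== chain =====
  set G : Int → Int → Bool :=
    fun i j => if bt i j = true then decide (YF i ≤ YF j) else decide (YF j ≤ YF i) with hG
  have hRYG : pc (fun i j => decide (YF i ≤ YF j)) order = pc G order := by
    apply pc_congr
    apply hpair.imp
    intro a b hab
    rw [hG]
    simp only [hab, if_pos]
  have hGsym : ∀ a b, G a b = G b a := by
    intro a b
    by_cases hab : a = b
    · subst hab; rfl
    · rw [hG]
      rcases btOf_total XF a b hab with h | h
      · have h' := btOf_asymm XF a b h
        rw [hbt] at *
        simp [h, h']
      · have h' := btOf_asymm XF b a h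
        rw [hbt] at *
        simp [h, h']
  have hGperm : pc G order = pc G rng := pc_perm hGsym hperm
  have hGR : pc G rng = pc Rfin rng := by
    apply pc_congr
    apply (PySem.List.pairwise_lt_pyRange_one 0 ((N : Int) + 1)).imp_of_mem
    intro a b hma hmb hab
    rw [PySem.List.mem_pyRange_one] at hma hmb
    obtain ⟨hXa, hYa⟩ := hXY a (by omega) (by omega)
    obtain ⟨hXb, hYb⟩ := hXY b (by omega) (by omega)
    have hmono1 : ppF g a.toNat ≤ ppF g b.toNat := ppF_mono g (by omega)
    have hmono2 : pnF g a.toNat ≤ pnF g b.toNat := pnF_mono g (by omega)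
    show (if bt a b = true then decide (YF a ≤ YF b) else decide (YF b ≤ YF a)) =
      decide (xIf g a ≤ xIf g b ∧ yIf g a ≤ yIf g b)
    by_cases hx : xIf g a ≤ xIf g b
    · have hbtab : bt a b = true := by
        rw [hbt, btOf]
        rcases lt_or_eq_of_le hx with hlt | heq
        · simp [hXa, hXb, hlt]
        · simp [hXa, hXb, heq, hab]
      rw [if_pos hbtab, hYa, hYb]
      have : (xIf g a ≤ xIf g b ∧ yIf g a ≤ yIf g b) ↔ (yIf g a ≤ yIf g b) := by
        constructor
        · exact fun h => h.2
        · exact fun h => ⟨hx, h⟩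
      rw [decide_eq_decide.mpr this]
    · have hbtab : bt a b = false := by
        rw [hbt, btOf]
        simp only [hXa, hXb]
        have h1 : ¬ (xIf g a < xIf g b) := by omega
        have h2 : xIf g b < xIf g a := by omega
        simp [h1, h2]
      rw [if_neg (by simp [hbtab]), hYa, hYb]
      have hyy : ¬ (yIf g b ≤ yIf g a) := by
        simp only [xIf, yIf] at *
        omega
      have hand : ¬ (xIf g a ≤ xIf g b ∧ yIf g a ≤ yIf g b) := fun h => hx h.1
      rw [decide_eq_false hyy, decide_eq_false hand]
  rw [hA, hB, hRYG, hGperm, hGR]
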